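-- pv_equiv track=rewrite | github.com/wajeshubham/DS-Algo | Algorithms/palindrome.py | is_palindrome_sent
-- ===== SOURCE A (Python) =====
-- def is_palindrome_sent(sent):
--     lst = sent.split(" ")
--     new_sent = ""
--     for i in range(len(lst) - 1, -1, -1):
--         if i == len(lst) - 1:
--             new_sent += lst[i]
--         else:
--             new_sent += " " + lst[i]
--
--     if new_sent == sent:
--         return True
--     return False
-- ===== SOURCE B (Python) =====
-- def is_palindrome_sent(sent):
--     lst = sent.split(" ")
--     i = 0
--     j = len(lst) - 1
--     while i < j:
--         if lst[i] != lst[j]: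
--             return False
--         i += 1
--         j -= 1
--     return True
-- ===== Notes on version B (the rewrite author's own statement) =====
-- stated objective: simpler
-- what changed: Instead of rebuilding the reversed sentence string and comparing it with the input, B walks the word list inward with two pointers and returns False at the first mismatching word pair, never materializing a string.
import Mathlib
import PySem

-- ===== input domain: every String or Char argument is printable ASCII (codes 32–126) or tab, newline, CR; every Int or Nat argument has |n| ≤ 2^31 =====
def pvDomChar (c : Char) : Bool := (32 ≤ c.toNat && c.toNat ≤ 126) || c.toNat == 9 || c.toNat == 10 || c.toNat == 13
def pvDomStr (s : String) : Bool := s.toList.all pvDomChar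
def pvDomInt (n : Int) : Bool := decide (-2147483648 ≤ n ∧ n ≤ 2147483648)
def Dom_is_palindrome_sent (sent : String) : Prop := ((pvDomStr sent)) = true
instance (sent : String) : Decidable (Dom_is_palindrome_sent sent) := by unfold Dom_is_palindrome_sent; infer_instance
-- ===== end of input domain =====

-- B replaces A's reversed-sentence string rebuild by a two-pointer inward walk over the word
-- list with early exit; the equivalence proved is about the return value (neither mutates).

-- ===== PORT A =====
-- strings are handled on the List Char side (PySem.Chars), exact for Python str on the domain
def is_palindrome_sent (sent : String) : Bool :=
  let cs := sent.toList
  let lst := PySem.Chars.splitOn cs [' ']          -- sent.split(" ")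
  let new_sent :=
    (PySem.List.pyRange ((lst.length : Int) - 1) (-1) (-1)).foldl
      (fun acc i =>
        if i == (lst.length : Int) - 1 then acc ++ PySem.List.pyGetD lst i []
        else acc ++ ([' '] ++ PySem.List.pyGetD lst i [])) []
  if new_sent == cs then true else false

-- ===== PORT B =====
-- while i < j: compare lst[i], lst[j] and walk inward (indices are always in range here,
-- so Python's lst[i] is exactly List.getD)
def pvTwoPtr (lst : List (List Char)) (i j : Nat) : Bool :=
  if i < j then
    if lst.getD i [] ≠ lst.getD j [] then false
    else pvTwoPtr lst (i + 1) (j - 1)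
  else true
termination_by j - i

def is_palindrome_sent_alt (sent : String) : Bool :=
  let lst := PySem.Chars.splitOn sent.toList [' ']  -- sent.split(" ")
  pvTwoPtr lst 0 (lst.length - 1)

-- ===== PRECONDITION & SPEC =====
def Spec_is_palindrome_sent (sent : String) (out : Bool) : Prop := out = is_palindrome_sent_alt sent
instance (sent : String) (out : Bool) : Decidable (Spec_is_palindrome_sent sent out) := by unfold Spec_is_palindrome_sent; infer_instance

-- ===== CLAIM (what is proved, stated in full; the proofs are below) =====
def Claim_equal_is_palindrome_sent : Prop := ∀ (sent : String), Dom_is_palindrome_sent sent → Spec_is_palindrome_sent sent (is_palindrome_sent sent)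

-- ===== LEMMAS AND PROOFS =====

-- PySem's splitOn with a one-character separator is core List.splitOn
lemma pvGo_single (c : Char) :
    ∀ (fuel : Nat) (l cur : List Char) (hacc : List (List Char)),
      l.length ≤ fuel →
      PySem.Chars.splitOn.go [c] fuel l cur hacc =
        hacc.reverse ++ (l.splitOn c).modifyHead (cur.reverse ++ ·) := by
  intro fuel
  induction fuel with
  | zero =>
    intro l cur hacc h
    have : l = [] := List.eq_nil_of_length_eq_zero (Nat.le_zero.mp h)
    subst this
    simp [PySem.Chars.splitOn.go, List.splitOn]
  | succ n ih =>
    intro l cur hacc h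
    cases l with
    | nil => simp [PySem.Chars.splitOn.go, List.splitOn]
    | cons a rest =>
      rw [PySem.Chars.splitOn.go]
      by_cases hc : c = a
      · subst hc
        simp only [List.isPrefixOf, BEq.rfl, Bool.true_and, if_pos]
        simp only [List.length_cons, List.drop_succ_cons, List.length_nil, List.drop_zero]
        rw [ih rest [] (cur.reverse :: hacc) (by simpa using Nat.le_of_succ_le_succ h)]
        simp [List.splitOn, List.splitOnP_cons]
        cases hh : List.splitOnP (fun x => x == c) rest <;> simp
      · have : ([c].isPrefixOf (a :: rest)) = false := by
          simp [List.isPrefixOf]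
          exact fun hh => absurd hh hc
        rw [this]
        simp only [Bool.false_eq_true, ite_false]
        rw [ih rest (a :: cur) hacc (by simpa using Nat.le_of_succ_le_succ h)]
        simp [List.splitOn, List.splitOnP_cons, Ne.symm hc, List.modifyHead_modifyHead]
        congr 1

lemma pvSplitOn_single (cs : List Char) (c : Char) :
    PySem.Chars.splitOn cs [c] = cs.splitOn c := by
  rw [PySem.Chars.splitOn, pvGo_single c (cs.length + 1) cs [] [] (Nat.le_succ _)]
  simp
  cases hh : List.splitOn c cs <;> simp

-- no word produced by split(" ") contains a space
lemma pvSplitOn_no_sep (l : List Char) : ∀ w ∈ l.splitOn ' ', ' ' ∉ w := by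
  induction l with
  | nil => intro w hw; simp [List.splitOn] at hw; simp [hw]
  | cons a rest ih =>
    intro w hw
    simp only [List.splitOn, List.splitOnP_cons] at hw ih
    by_cases ha : a = ' '
    · subst ha
      simp at hw
      rcases hw with hw | hw
      · simp [hw]
      · exact ih w hw
    · have hne : (a == ' ') = false := by simp [ha]
      rw [hne] at hw
      simp at hw
      obtain ⟨h0, t0, hsplit⟩ := List.exists_cons_of_ne_nil (List.splitOnP_ne_nil (fun x => x == ' ') rest)
      rw [hsplit] at hw
      simp at hw
      rcases hw with hw | hw
      · subst hw
        intro hmem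
        rcases List.mem_cons.mp hmem with h | h
        · exact ha h.symm
        · exact ih h0 (by rw [hsplit]; exact List.mem_cons_self) h
      · exact ih w (by rw [hsplit]; exact List.mem_cons_of_mem _ hw)

lemma pvIntercalate_cons (w : List Char) (ws : List (List Char)) :
    List.intercalate [' '] (w :: ws) = w ++ ws.flatMap (fun v => ' ' :: v) := by
  induction ws generalizing w with
  | nil => simp [List.intercalate]
  | cons v vs ih =>
    have step : List.intercalate [' '] (w :: v :: vs) = w ++ [' '] ++ List.intercalate [' '] (v :: vs) := by
      simp [List.intercalate, List.intersperse]
    rw [step, ih]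
    simp

-- the descending index loop body, as a flatMap over the reversed prefix
lemma pvDescend (lst : List (List Char)) :
    ∀ m, m ≤ lst.length →
      (PySem.List.pyRange ((m : Int) - 1) (-1) (-1)).flatMap
          (fun i => ' ' :: PySem.List.pyGetD lst i []) =
        ((lst.take m).reverse).flatMap (fun w => ' ' :: w) := by
  intro m
  induction m with
  | zero => intro _; rw [PySem.List.pyRange_neg_one_eq_nil (by norm_num)]; simp
  | succ k ih =>
    intro h
    have hk : k < lst.length := h
    rw [PySem.List.pyRange_neg_one_cons (by push_cast; omega)]
    have e1 : ((k + 1 : Nat) : Int) - 1 = (k : Nat) := by push_cast; ring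
    rw [e1]
    rw [List.flatMap_cons, ih (Nat.le_of_lt hk)]
    have hget : PySem.List.pyGetD lst ((k : Nat) : Int) [] = lst[k] := by
      rw [PySem.List.pyGetD_natCast]
      simp [List.getD_eq_getElem?_getD, List.getElem?_eq_getElem hk]
    rw [hget, List.take_succ_eq_append_getElem hk]
    rw [List.reverse_append, List.reverse_singleton, List.singleton_append, List.flatMap_cons]

-- A computes: "the words joined back in reverse order equals the sentence"
lemma pvSplit_ne_nil (sent : String) : PySem.Chars.splitOn sent.toList [' '] ≠ [] := by
  rw [pvSplitOn_single]
  simp [List.splitOn]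
  exact List.splitOnP_ne_nil _ _

lemma pvA_char (sent : String) :
    is_palindrome_sent sent =
      (List.intercalate [' '] (PySem.Chars.splitOn sent.toList [' ']).reverse == sent.toList) := by
  unfold is_palindrome_sent
  simp only []
  set lst := PySem.Chars.splitOn sent.toList [' '] with hlst
  have hne : lst ≠ [] := pvSplit_ne_nil sent
  have hn : 0 < lst.length := List.length_pos_iff.mpr hne
  have hrange : PySem.List.pyRange ((lst.length : Int) - 1) (-1) (-1)
      = ((lst.length : Int) - 1) :: PySem.List.pyRange ((lst.length : Int) - 1 - 1) (-1) (-1) :=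
    PySem.List.pyRange_neg_one_cons (by push_cast; omega)
  rw [hrange, List.foldl_cons]
  simp only [beq_self_eq_true, if_true, List.nil_append]
  rw [PySem.List.foldl_congr_mem _ _ (fun acc i => acc ++ ([' '] ++ PySem.List.pyGetD lst i [])) _
      (by
        intro acc x hx
        rw [PySem.List.mem_pyRange_neg_one] at hx
        have : (x == (lst.length : Int) - 1) = false := by
          simp only [beq_eq_false_iff_ne, ne_eq]
          omega
        rw [this]
        simp)]
  rw [PySem.List.foldl_append_eq_flatMap (fun i => [' '] ++ PySem.List.pyGetD lst i [])]
  have ecast : (lst.length : Int) - 1 - 1 = ((lst.length - 1 : Nat) : Int) - 1 := by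
    omega
  rw [ecast]
  have hflat : (PySem.List.pyRange (((lst.length - 1 : Nat) : Int) - 1) (-1) (-1)).flatMap
      (fun i => [' '] ++ PySem.List.pyGetD lst i []) =
      ((lst.take (lst.length - 1)).reverse).flatMap (fun w => ' ' :: w) := by
    rw [← pvDescend lst (lst.length - 1) (by omega)]
    simp [List.singleton_append]
  rw [hflat]
  have hget : PySem.List.pyGetD lst ((lst.length : Int) - 1) [] =
      lst[lst.length - 1]'(by omega) := by
    have e : (lst.length : Int) - 1 = ((lst.length - 1 : Nat) : Int) := by omega
    rw [e, PySem.List.pyGetD_natCast]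
    exact List.getD_eq_getElem lst [] (by omega)
  rw [hget]
  have hrev : lst.reverse = lst[lst.length - 1]'(by omega) :: (lst.take (lst.length - 1)).reverse := by
    conv_lhs => rw [← List.dropLast_append_getLast hne]
    rw [List.reverse_append, List.reverse_singleton, List.singleton_append, List.dropLast_eq_take,
        List.getLast_eq_getElem]
  rw [hrev, pvIntercalate_cons]
  cases hc : (lst[lst.length - 1]'(by omega) ++ ((lst.take (lst.length - 1)).reverse).flatMap (fun w => ' ' :: w)) == sent.toList <;> simp

-- B's two-pointer loop checks the palindrome condition on indices
lemma pvTwoPtr_iff (lst : List (List Char)) :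
    ∀ (d i j : Nat), j - i = d →
      (pvTwoPtr lst i j = true ↔
        ∀ k, i ≤ k → k ≤ j → lst.getD k [] = lst.getD (i + j - k) []) := by
  intro d
  induction d using Nat.strong_induction_on with
  | _ d ih =>
    intro i j hd
    rw [pvTwoPtr]
    by_cases hij : i < j
    · simp only [hij, if_true]
      by_cases heq : lst.getD i [] = lst.getD j []
      · simp only [heq, ne_eq, not_true_eq_false, if_false]
        have hlt : d - 2 < d := by omega
        have harg : j - 1 - (i + 1) = d - 2 := by omega
        rw [ih (d - 2) hlt (i + 1) (j - 1) harg]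
        constructor
        · intro H k hik hkj
          rcases Nat.eq_or_lt_of_le hik with h | h
          · subst h
            have : i + j - i = j := by omega
            rw [this]; exact heq
          · rcases Nat.eq_or_lt_of_le hkj with h2 | h2
            · subst h2
              have : i + k - k = i := by omega
              rw [this]; exact heq.symm
            · have := H k (by omega) (by omega)
              have e : i + 1 + (j - 1) - k = i + j - k := by omega
              rw [e] at this
              exact this
        · intro H k hik hkj
          have := H k (by omega) (by omega)
          have e : i + 1 + (j - 1) - k = i + j - k := by omega
          rw [e]
          exact this
      · simp only [heq, ne_eq, not_false_eq_true, if_true]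
        constructor
        · intro h; exact absurd h (by simp)
        · intro H
          exfalso
          apply heq
          have := H i (Nat.le_refl i) (Nat.le_of_lt hij)
          have e : i + j - i = j := by omega
          rw [e] at this
          exact this
    · simp only [hij, if_false]
      constructor
      · intro _ k hik hkj
        have hk : k = i ∧ k = j := by omega
        have e : i + j - k = k := by omega
        rw [e]
      · intro _
        simp

lemma pvB_char (sent : String) :
    is_palindrome_sent_alt sent =
      ((PySem.Chars.splitOn sent.toList [' ']).reverse == PySem.Chars.splitOn sent.toList [' ']) := by
  unfold is_palindrome_sent_alt
  set lst := PySem.Chars.splitOn sent.toList [' '] with hlst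
  have hne : lst ≠ [] := by
    rw [hlst, pvSplitOn_single]
    simp [List.splitOn]
    exact List.splitOnP_ne_nil _ _
  have hn : 0 < lst.length := List.length_pos_iff.mpr hne
  have hiff : (pvTwoPtr lst 0 (lst.length - 1) = true) ↔ lst.reverse = lst := by
    rw [pvTwoPtr_iff lst (lst.length - 1) 0 (lst.length - 1) rfl]
    constructor
    · intro H
      apply List.ext_getElem (by simp)
      intro k hk _
      have hk' : k < lst.length := by simpa using hk
      have hH := H k (Nat.zero_le k) (by omega)
      have e : 0 + (lst.length - 1) - k = lst.length - 1 - k := by omega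
      rw [e] at hH
      rw [List.getD_eq_getElem lst [] hk', List.getD_eq_getElem lst [] (by omega)] at hH
      rw [List.getElem_reverse]
      exact hH.symm
    · intro H k _ hk
      have hk' : k < lst.length := by omega
      have e : 0 + (lst.length - 1) - k = lst.length - 1 - k := by omega
      rw [e, List.getD_eq_getElem lst [] hk', List.getD_eq_getElem lst [] (by omega)]
      have h1 : lst.reverse[k]'(by simpa using hk') = lst[k] := List.getElem_of_eq H _
      rw [← h1, List.getElem_reverse]
  cases hb : (lst.reverse == lst) with
  | true => exact hiff.mpr (by simpa using hb)
  | false =>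
    by_contra hcon
    have : pvTwoPtr lst 0 (lst.length - 1) = true := by
      cases hx : pvTwoPtr lst 0 (lst.length - 1)
      · exact absurd hx hcon
      · rfl
    have := hiff.mp this
    simp [this] at hb

-- ===== VERDICT (by name: the statement is the Claim_ definition above) =====
theorem is_palindrome_sent_spec : Claim_equal_is_palindrome_sent := by
  intro sent _
  unfold Spec_is_palindrome_sent
  rw [pvA_char, pvB_char, pvSplitOn_single]
  set lst := sent.toList.splitOn ' ' with hlst
  have hsent : List.intercalate [' '] lst = sent.toList := List.intercalate_splitOn sent.toList ' '
  by_cases hp : lst.reverse = lst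
  · rw [hp, hsent]; simp
  · have hne : List.intercalate [' '] lst.reverse ≠ sent.toList := by
      intro h
      apply hp
      have hnosp : ∀ w ∈ lst.reverse, ' ' ∉ w := by
        intro w hw
        exact pvSplitOn_no_sep sent.toList w (List.mem_reverse.mp hw)
      have hnn : lst.reverse ≠ [] := by
        simp [hlst, List.splitOn]
        exact List.splitOnP_ne_nil _ _
      have := List.splitOn_intercalate lst.reverse ' ' hnosp hnn
      rw [h] at this
      rw [← hlst] at this
      exact this.symm
    simp [hne, hp]
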